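-- pv_equiv track=rewrite | github.com/berenslab/retinal-rl | runner/frameworks/classification/analyze.py | _wandb_title
-- ===== SOURCE A (Python) =====
-- def _wandb_title(title: str) -> str:
--     # Split the title by slashes
--     parts = title.split("/")
--
--     def capitalize_part(part: str) -> str:
--         # Split the part by dashes
--         words = part.split("_")
--         # Capitalize each word
--         capitalized_words = [word.capitalize() for word in words]
--         # Join the words with spaces
--         return " ".join(capitalized_words)
--
--     # Capitalize each part, then join with slashes
--     capitalized_parts = [capitalize_part(part) for part in parts]
--     return "/".join(capitalized_parts)
-- ===== SOURCE B (Python) =====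
-- def _wandb_title(title: str) -> str:
--     out = []
--     at_word_start = True
--     for ch in title:
--         if ch == "/":
--             out.append("/")
--             at_word_start = True
--         elif ch == "_":
--             out.append(" ")
--             at_word_start = True
--         elif at_word_start:
--             out.append(ch.title())
--             at_word_start = False
--         else:
--             out.append(ch.lower())
--     return "".join(out)
-- ===== Notes on version B (the rewrite author's own statement) =====
-- stated objective: simpler
-- what changed: Replaces the nested split/capitalize/join pipeline with a single linear scan over the characters maintaining an at-word-start flag, emitting each separator, titlecased or lowercased character directly.
import Mathlib
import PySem

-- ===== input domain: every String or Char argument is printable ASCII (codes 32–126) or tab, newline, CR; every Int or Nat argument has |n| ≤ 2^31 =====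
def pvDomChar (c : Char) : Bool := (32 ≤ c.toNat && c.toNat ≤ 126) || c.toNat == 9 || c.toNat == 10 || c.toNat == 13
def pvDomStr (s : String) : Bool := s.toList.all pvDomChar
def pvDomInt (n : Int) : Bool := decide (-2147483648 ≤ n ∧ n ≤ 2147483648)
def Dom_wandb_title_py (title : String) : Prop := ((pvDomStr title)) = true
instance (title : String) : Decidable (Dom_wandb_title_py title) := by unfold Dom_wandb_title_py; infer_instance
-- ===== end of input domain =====

-- B replaces A's nested split/capitalize/join with one stateful scan over the characters (objective: simpler decomposition, same cost).

-- ===== PORT A =====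
-- str.capitalize: first char titlecased, rest lowered (titlecase = upperChar, exact on the ASCII domain)
def pyCapitalizeA (w : List Char) : List Char :=
  match w with
  | [] => []
  | c :: rest => PySem.Chars.upperChar c :: PySem.Chars.lower rest

def capitalizePartA (part : List Char) : List Char :=
  PySem.Chars.join [' '] ((PySem.Chars.splitOn part ['_']).map pyCapitalizeA)

def wandb_title_py (title : String) : String :=
  String.mk (PySem.Chars.join ['/'] ((PySem.Chars.splitOn title.toList ['/']).map capitalizePartA))

-- ===== PORT B =====
def scanB (flag : Bool) : List Char → List Char
  | [] => []
  | c :: rest =>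
    if c = '/' then '/' :: scanB true rest
    else if c = '_' then ' ' :: scanB true rest
    else (if flag then PySem.Chars.upperChar c else PySem.Chars.lowerChar c) :: scanB false rest

def wandb_title_py_alt (title : String) : String :=
  String.mk (scanB true title.toList)

-- ===== PRECONDITION & SPEC =====
def Spec_wandb_title_py (title : String) (out : String) : Prop := out = wandb_title_py_alt title
instance (title : String) (out : String) : Decidable (Spec_wandb_title_py title out) := by unfold Spec_wandb_title_py; infer_instance

-- ===== CLAIM (what is proved, stated in full; the proofs are below) =====
def Claim_equal_wandb_title_py : Prop := ∀ (title : String), Dom_wandb_title_py title → Spec_wandb_title_py title (wandb_title_py title)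

-- ===== LEMMAS AND PROOFS =====

-- clean structural form of splitting on a single-char separator: (first piece, remaining pieces)
def sp0 (s : Char) : List Char → List Char × List (List Char)
  | [] => ([], [])
  | c :: cs =>
    let p := sp0 s cs
    if c = s then ([], p.1 :: p.2) else (c :: p.1, p.2)

theorem go_spec (s : Char) : ∀ (fuel : Nat) (l cur : List Char) (acc : List (List Char)),
    l.length ≤ fuel →
    PySem.Chars.splitOn.go [s] fuel l cur acc
      = acc.reverse ++ ((cur.reverse ++ (sp0 s l).1) :: (sp0 s l).2) := by
  intro fuel
  induction fuel with
  | zero =>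
    intro l cur acc h
    have : l = [] := List.eq_nil_of_length_eq_zero (Nat.le_zero.mp h)
    subst this
    simp [PySem.Chars.splitOn.go, sp0]
  | succ n ih =>
    intro l cur acc h
    cases l with
    | nil => simp [PySem.Chars.splitOn.go, sp0]
    | cons c rest =>
      simp only [PySem.Chars.splitOn.go]
      by_cases hc : c = s
      · subst hc
        have hp : List.isPrefixOf [c] (c :: rest) = true := by simp [List.isPrefixOf]
        rw [if_pos hp]
        have hdrop : List.drop [c].length (c :: rest) = rest := rfl
        rw [hdrop, ih rest [] (cur.reverse :: acc) (by simpa using Nat.le_of_succ_le_succ h)]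
        simp [sp0]
      · have hp : List.isPrefixOf [s] (c :: rest) = false := by
          simp [List.isPrefixOf]
          exact Ne.symm hc
        rw [if_neg (by simp [hp])]
        rw [ih rest (c :: cur) acc (by simpa using Nat.le_of_succ_le_succ h)]
        simp [sp0, hc]

theorem splitOn_eq (s : Char) (cs : List Char) :
    PySem.Chars.splitOn cs [s] = (sp0 s cs).1 :: (sp0 s cs).2 := by
  unfold PySem.Chars.splitOn
  rw [go_spec s (cs.length + 1) cs [] [] (Nat.le_succ _)]
  simp

-- A's computation rewritten through sp0
def capP (p : List Char) : List Char :=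
  PySem.Chars.join [' '] (((sp0 '_' p).1 :: (sp0 '_' p).2).map pyCapitalizeA)

def lowP (p : List Char) : List Char :=
  PySem.Chars.join [' '] (PySem.Chars.lower (sp0 '_' p).1 :: ((sp0 '_' p).2).map pyCapitalizeA)

def A0 (cs : List Char) : List Char :=
  PySem.Chars.join ['/'] (((sp0 '/' cs).1 :: (sp0 '/' cs).2).map capP)

def Low (cs : List Char) : List Char :=
  PySem.Chars.join ['/'] (lowP (sp0 '/' cs).1 :: ((sp0 '/' cs).2).map capP)

theorem join_cons_head (sep : List Char) (c : Char) (w : List Char) (ws : List (List Char)) :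
    PySem.Chars.join sep ((c :: w) :: ws) = c :: PySem.Chars.join sep (w :: ws) := by
  cases ws with
  | nil => simp [PySem.Chars.join_singleton]
  | cons y ys => simp [PySem.Chars.join_cons_cons]

theorem capP_nil : capP [] = [] := by
  simp [capP, sp0, pyCapitalizeA, PySem.Chars.join_singleton]

theorem lowP_nil : lowP [] = [] := by
  simp [lowP, sp0, PySem.Chars.lower, PySem.Chars.join_singleton]

theorem capP_us (p : List Char) : capP ('_' :: p) = ' ' :: capP p := by
  simp only [capP, sp0, reduceIte, List.map_cons, pyCapitalizeA]
  rw [PySem.Chars.join_cons_cons]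
  rfl

theorem lowP_us (p : List Char) : lowP ('_' :: p) = ' ' :: capP p := by
  simp only [lowP, capP, sp0, reduceIte, List.map_cons]
  rw [PySem.Chars.join_cons_cons]
  simp [PySem.Chars.lower]

theorem capP_other (c : Char) (p : List Char) (hc : ¬ c = '_') :
    capP (c :: p) = PySem.Chars.upperChar c :: lowP p := by
  simp only [capP, lowP, sp0, if_neg hc, List.map_cons, pyCapitalizeA]
  rw [join_cons_head]

theorem lowP_other (c : Char) (p : List Char) (hc : ¬ c = '_') :
    lowP (c :: p) = PySem.Chars.lowerChar c :: lowP p := by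
  simp only [lowP, sp0, if_neg hc, List.map_cons]
  have : PySem.Chars.lower (c :: (sp0 '_' p).1)
      = PySem.Chars.lowerChar c :: PySem.Chars.lower (sp0 '_' p).1 := by
    simp [PySem.Chars.lower]
  rw [this, join_cons_head]

theorem A0_slash (cs : List Char) : A0 ('/' :: cs) = '/' :: A0 cs := by
  simp only [A0, sp0, reduceIte, List.map_cons]
  rw [PySem.Chars.join_cons_cons, capP_nil]
  rfl

theorem Low_slash (cs : List Char) : Low ('/' :: cs) = '/' :: A0 cs := by
  simp only [Low, A0, sp0, reduceIte, List.map_cons]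
  rw [PySem.Chars.join_cons_cons, lowP_nil]
  rfl

theorem A0_us (cs : List Char) : A0 ('_' :: cs) = ' ' :: A0 cs := by
  simp only [A0, sp0, if_neg (by decide : ¬ ('_' : Char) = '/'), List.map_cons]
  rw [capP_us, join_cons_head]

theorem Low_us (cs : List Char) : Low ('_' :: cs) = ' ' :: A0 cs := by
  simp only [Low, A0, sp0, if_neg (by decide : ¬ ('_' : Char) = '/'), List.map_cons]
  rw [lowP_us, join_cons_head]

theorem A0_other (c : Char) (cs : List Char) (h1 : ¬ c = '/') (h2 : ¬ c = '_') :
    A0 (c :: cs) = PySem.Chars.upperChar c :: Low cs := by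
  simp only [A0, Low, sp0, if_neg h1, List.map_cons]
  rw [capP_other c _ h2, join_cons_head]

theorem Low_other (c : Char) (cs : List Char) (h1 : ¬ c = '/') (h2 : ¬ c = '_') :
    Low (c :: cs) = PySem.Chars.lowerChar c :: Low cs := by
  simp only [Low, sp0, if_neg h1, List.map_cons]
  rw [lowP_other c _ h2, join_cons_head]

theorem main_lemma : ∀ cs : List Char, scanB true cs = A0 cs ∧ scanB false cs = Low cs := by
  intro cs
  induction cs with
  | nil =>
    constructor <;>
      simp [scanB, A0, Low, sp0, capP_nil, lowP_nil, PySem.Chars.join_singleton]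
  | cons c rest ih =>
    obtain ⟨ihT, ihF⟩ := ih
    by_cases h1 : c = '/'
    · subst h1
      constructor
      · rw [A0_slash]; simp [scanB, ihT]
      · rw [Low_slash]; simp [scanB, ihT]
    · by_cases h2 : c = '_'
      · subst h2
        constructor
        · rw [A0_us]; simp [scanB, ihT]
        · rw [Low_us]; simp [scanB, ihT]
      · constructor
        · rw [A0_other c rest h1 h2]; simp [scanB, h1, h2, ihF]
        · rw [Low_other c rest h1 h2]; simp [scanB, h1, h2, ihF]

theorem capitalizePartA_eq (p : List Char) : capitalizePartA p = capP p := by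
  unfold capitalizePartA capP
  rw [splitOn_eq]

theorem A_eq (title : String) : wandb_title_py title = String.mk (A0 title.toList) := by
  unfold wandb_title_py A0
  rw [splitOn_eq]
  have h : capitalizePartA = capP := funext capitalizePartA_eq
  rw [h]

-- ===== VERDICT (by name: the statement is the Claim_ definition above) =====
theorem wandb_title_py_spec : Claim_equal_wandb_title_py := by
  intro title _
  unfold Spec_wandb_title_py wandb_title_py_alt
  rw [A_eq, (main_lemma title.toList).1]
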